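-- pv_equiv track=rewrite | github.com/broody/hashfront | tools/autoplay/planner.py | _tiles_in_attack_range
-- ===== SOURCE A (Python) =====
-- def _tiles_in_attack_range(pos, a_range, w, h):
--     if isinstance(a_range, tuple):
--         min_r, max_r = a_range
--     else:
--         min_r, max_r = a_range, a_range
--     x0, y0 = pos
--     for dx in range(-max_r, max_r + 1):
--         for dy in range(-max_r, max_r + 1):
--             d = abs(dx) + abs(dy)
--             if min_r <= d <= max_r:
--                 nx, ny = x0 + dx, y0 + dy
--                 if 0 <= nx < w and 0 <= ny < h:
--                     yield nx, ny
-- ===== SOURCE B (Python) =====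
-- def _tiles_in_attack_range(pos, a_range, w, h):
--     if isinstance(a_range, tuple):
--         min_r, max_r = a_range
--     else:
--         min_r, max_r = a_range, a_range
--     x0, y0 = pos
--     for nx in range(max(0, x0 - max_r), min(w, x0 + max_r + 1)):
--         m = abs(nx - x0)
--         hi = max_r - m
--         lo = max(0, min_r - m)
--         if lo == 0:
--             for ny in range(max(0, y0 - hi), min(h, y0 + hi + 1)):
--                 yield nx, ny
--         else:
--             for ny in range(max(0, y0 - hi), min(h, y0 - lo + 1)):
--                 yield nx, ny
--             for ny in range(max(0, y0 + lo), min(h, y0 + hi + 1)):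
--                 yield nx, ny
-- ===== Notes on version B (the rewrite author's own statement) =====
-- stated objective: alternative
-- what changed: B loops directly over the grid columns nx clamped to [0,w) around x0 and, per column, over one or two clamped ny ranges covering the Manhattan band, so every generated cell is yielded with no per-cell distance or bounds test, instead of scanning the full (2*max_r+1)^2 box and filtering each cell.
import Mathlib
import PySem

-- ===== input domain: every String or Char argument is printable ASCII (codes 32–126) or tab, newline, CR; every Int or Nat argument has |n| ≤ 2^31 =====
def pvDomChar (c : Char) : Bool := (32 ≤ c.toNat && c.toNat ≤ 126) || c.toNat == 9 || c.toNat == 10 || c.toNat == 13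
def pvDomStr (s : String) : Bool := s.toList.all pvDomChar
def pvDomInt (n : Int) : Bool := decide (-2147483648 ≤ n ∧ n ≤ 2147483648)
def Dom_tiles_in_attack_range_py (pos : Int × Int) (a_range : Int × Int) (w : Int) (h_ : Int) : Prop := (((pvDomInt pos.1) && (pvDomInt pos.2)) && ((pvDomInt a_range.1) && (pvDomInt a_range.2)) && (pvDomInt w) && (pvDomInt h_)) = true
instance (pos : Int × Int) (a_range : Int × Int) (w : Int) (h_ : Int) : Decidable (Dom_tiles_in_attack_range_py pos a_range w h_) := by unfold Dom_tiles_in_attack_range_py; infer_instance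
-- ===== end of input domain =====

-- B loops directly over the grid columns nx clamped to [0,w) and, per column, over one or two
-- clamped ny ranges covering the Manhattan band — no per-cell distance or bounds test
-- (objective: alternative — a direct band enumeration instead of A's box scan with filtering).

-- ===== PORT A =====
-- literal port of A: full box scan, distance filter, then bounds check (a_range is a tuple here)
def tiles_in_attack_range_py (pos : Int × Int) (a_range : Int × Int) (w : Int) (h_ : Int) : List (Int × Int) :=
  let min_r := a_range.1
  let max_r := a_range.2
  let x0 := pos.1
  let y0 := pos.2
  (PySem.List.pyRange (-max_r) (max_r + 1) 1).foldl (fun acc dx =>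
    (PySem.List.pyRange (-max_r) (max_r + 1) 1).foldl (fun acc dy =>
      let d := |dx| + |dy|
      if min_r ≤ d ∧ d ≤ max_r then
        let nx := x0 + dx
        let ny := y0 + dy
        if 0 ≤ nx ∧ nx < w ∧ 0 ≤ ny ∧ ny < h_ then acc ++ [(nx, ny)] else acc
      else acc) acc) []

-- ===== PORT B =====
-- literal port of Source B: nx over the clamped column range; per nx, one or two clamped ny ranges
def tiles_in_attack_range_py_alt (pos : Int × Int) (a_range : Int × Int) (w : Int) (h_ : Int) : List (Int × Int) :=
  let min_r := a_range.1
  let max_r := a_range.2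
  let x0 := pos.1
  let y0 := pos.2
  (PySem.List.pyRange (max 0 (x0 - max_r)) (min w (x0 + max_r + 1)) 1).flatMap (fun nx =>
    let m := |nx - x0|
    let hi := max_r - m
    let lo := max 0 (min_r - m)
    if lo = 0 then
      (PySem.List.pyRange (max 0 (y0 - hi)) (min h_ (y0 + hi + 1)) 1).map (fun ny => (nx, ny))
    else
      (PySem.List.pyRange (max 0 (y0 - hi)) (min h_ (y0 - lo + 1)) 1).map (fun ny => (nx, ny)) ++
      (PySem.List.pyRange (max 0 (y0 + lo)) (min h_ (y0 + hi + 1)) 1).map (fun ny => (nx, ny)))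

-- ===== PRECONDITION & SPEC =====
def Spec_tiles_in_attack_range_py (pos : Int × Int) (a_range : Int × Int) (w : Int) (h_ : Int) (out : List (Int × Int)) : Prop := out = tiles_in_attack_range_py_alt pos a_range w h_
instance (pos : Int × Int) (a_range : Int × Int) (w : Int) (h_ : Int) (out : List (Int × Int)) : Decidable (Spec_tiles_in_attack_range_py pos a_range w h_ out) := by unfold Spec_tiles_in_attack_range_py; infer_instance

-- ===== CLAIM (what is proved, stated in full; the proofs are below) =====
def Claim_equal_tiles_in_attack_range_py : Prop := ∀ (pos : Int × Int) (a_range : Int × Int) (w : Int) (h_ : Int), Dom_tiles_in_attack_range_py pos a_range w h_ → Spec_tiles_in_attack_range_py pos a_range w h_ (tiles_in_attack_range_py pos a_range w h_)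

-- ===== LEMMAS AND PROOFS =====

-- filtering an int range by a closed interval yields a subrange
theorem pv_filter_range_interval (c d : Int) : ∀ (n : ℕ) (a b : Int), (b - a).toNat ≤ n →
    (PySem.List.pyRange a b 1).filter (fun x => decide (c ≤ x ∧ x ≤ d)) =
      PySem.List.pyRange (max a c) (min b (d + 1)) 1 := by
  intro n
  induction n with
  | zero =>
    intro a b h
    rw [PySem.List.pyRange_one_eq_nil (by omega),
      PySem.List.pyRange_one_eq_nil
        (le_trans (min_le_left _ _) (le_trans (by omega) (le_max_left _ _)))]
    rfl
  | succ n ih =>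
    intro a b h
    by_cases hab : b ≤ a
    · rw [PySem.List.pyRange_one_eq_nil hab,
        PySem.List.pyRange_one_eq_nil
          (le_trans (min_le_left _ _) (le_trans hab (le_max_left _ _)))]
      rfl
    · have hab' : a < b := by omega
      rw [PySem.List.pyRange_one_cons hab', List.filter_cons, ih (a + 1) b (by omega)]
      by_cases hc : c ≤ a ∧ a ≤ d
      · rw [if_pos (by simpa using hc)]
        have h1 : max (a + 1) c = a + 1 := max_eq_left (by omega)
        have h2 : max a c = a := max_eq_left (by omega)
        have h3 : a < min b (d + 1) := lt_min hab' (by omega)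
        rw [h1, h2, PySem.List.pyRange_one_cons h3]
      · rw [if_neg (by simpa using hc)]
        rcases not_and_or.mp hc with hca | had
        · have h1 : max (a + 1) c = max a c := by
            rw [max_eq_right (by omega : a + 1 ≤ c), max_eq_right (by omega : a ≤ c)]
          rw [h1]
        · rw [PySem.List.pyRange_one_eq_nil
              (le_trans (min_le_right _ _) (le_trans (by omega) (le_max_left _ _))),
            PySem.List.pyRange_one_eq_nil
              (le_trans (min_le_right _ _) (le_trans (by omega) (le_max_left _ _)))]

-- the distance filter over the full dy-range, band nonempty case (lo > 0)
theorem pv_band_pos (min_r R m : Int) (hm0 : 0 ≤ m) (hmR : m ≤ R) (hz : 0 < min_r - m) :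
    (PySem.List.pyRange (-R) (R + 1) 1).filter
        (fun dy => decide (min_r ≤ m + |dy| ∧ m + |dy| ≤ R)) =
      PySem.List.pyRange (-(R - m)) (-(min_r - m) + 1) 1 ++
        PySem.List.pyRange (min_r - m) (R - m + 1) 1 := by
  rw [PySem.List.pyRange_one_append (-R) 0 (R + 1) (by omega) (by omega), List.filter_append]
  have hneg : (PySem.List.pyRange (-R) 0 1).filter
      (fun dy => decide (min_r ≤ m + |dy| ∧ m + |dy| ≤ R)) =
      (PySem.List.pyRange (-R) 0 1).filter
      (fun dy => decide (-(R - m) ≤ dy ∧ dy ≤ m - min_r)) := by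
    apply List.filter_congr
    intro x hx
    have hx' := (PySem.List.mem_pyRange_one).mp hx
    rw [abs_of_neg (show x < 0 by omega)]
    simp only [decide_eq_decide]
    omega
  have hpos : (PySem.List.pyRange 0 (R + 1) 1).filter
      (fun dy => decide (min_r ≤ m + |dy| ∧ m + |dy| ≤ R)) =
      (PySem.List.pyRange 0 (R + 1) 1).filter
      (fun dy => decide (min_r - m ≤ dy ∧ dy ≤ R - m)) := by
    apply List.filter_congr
    intro x hx
    have hx' := (PySem.List.mem_pyRange_one).mp hx
    rw [abs_of_nonneg (show 0 ≤ x by omega)]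
    simp only [decide_eq_decide]
    omega
  rw [hneg, hpos,
    pv_filter_range_interval (-(R - m)) (m - min_r) (0 - (-R)).toNat (-R) 0 (by omega),
    pv_filter_range_interval (min_r - m) (R - m) (R + 1 - 0).toNat 0 (R + 1) (by omega),
    max_eq_right (by omega : -R ≤ -(R - m)),
    min_eq_right (by omega : m - min_r + 1 ≤ 0),
    max_eq_right (by omega : (0:Int) ≤ min_r - m),
    min_eq_right (by omega : R - m + 1 ≤ R + 1)]
  have : m - min_r + 1 = -(min_r - m) + 1 := by ring
  rw [this]

-- the distance filter over the full dy-range, contiguous case (lo = 0)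
theorem pv_band_zero (min_r R m : Int) (hm0 : 0 ≤ m) (hmR : m ≤ R) (hz : min_r - m ≤ 0) :
    (PySem.List.pyRange (-R) (R + 1) 1).filter
        (fun dy => decide (min_r ≤ m + |dy| ∧ m + |dy| ≤ R)) =
      PySem.List.pyRange (-(R - m)) (R - m + 1) 1 := by
  rw [PySem.List.pyRange_one_append (-R) 0 (R + 1) (by omega) (by omega), List.filter_append]
  have hneg : (PySem.List.pyRange (-R) 0 1).filter
      (fun dy => decide (min_r ≤ m + |dy| ∧ m + |dy| ≤ R)) =
      (PySem.List.pyRange (-R) 0 1).filter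
      (fun dy => decide (-(R - m) ≤ dy ∧ dy ≤ m - min_r)) := by
    apply List.filter_congr
    intro x hx
    have hx' := (PySem.List.mem_pyRange_one).mp hx
    rw [abs_of_neg (show x < 0 by omega)]
    simp only [decide_eq_decide]
    omega
  have hpos : (PySem.List.pyRange 0 (R + 1) 1).filter
      (fun dy => decide (min_r ≤ m + |dy| ∧ m + |dy| ≤ R)) =
      (PySem.List.pyRange 0 (R + 1) 1).filter
      (fun dy => decide (min_r - m ≤ dy ∧ dy ≤ R - m)) := by
    apply List.filter_congr
    intro x hx
    have hx' := (PySem.List.mem_pyRange_one).mp hx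
    rw [abs_of_nonneg (show 0 ≤ x by omega)]
    simp only [decide_eq_decide]
    omega
  rw [hneg, hpos,
    pv_filter_range_interval (-(R - m)) (m - min_r) (0 - (-R)).toNat (-R) 0 (by omega),
    pv_filter_range_interval (min_r - m) (R - m) (R + 1 - 0).toNat 0 (R + 1) (by omega),
    max_eq_right (by omega : -R ≤ -(R - m)),
    min_eq_left (by omega : (0:Int) ≤ m - min_r + 1),
    max_eq_left (by omega : min_r - m ≤ (0:Int)),
    min_eq_right (by omega : R - m + 1 ≤ R + 1),
    ← PySem.List.pyRange_one_append (-(R - m)) 0 (R - m + 1) (by omega) (by omega)]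

-- a range mapped through a shift-and-pair equals the shifted range mapped through pairing
theorem pv_map_pair_shift (nx y0 : Int) : ∀ (n : ℕ) (a b : Int), (b - a).toNat ≤ n →
    (PySem.List.pyRange a b 1).map (fun dy => ((nx, y0 + dy) : Int × Int)) =
      (PySem.List.pyRange (y0 + a) (y0 + b) 1).map (fun ny => (nx, ny)) := by
  intro n
  induction n with
  | zero =>
    intro a b h
    rw [PySem.List.pyRange_one_eq_nil (by omega), PySem.List.pyRange_one_eq_nil (by omega)]
    rfl
  | succ n ih =>
    intro a b h
    by_cases hab : b ≤ a
    · rw [PySem.List.pyRange_one_eq_nil (by omega), PySem.List.pyRange_one_eq_nil (by omega)]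
      rfl
    · rw [PySem.List.pyRange_one_cons (by omega : a < b),
        PySem.List.pyRange_one_cons (by omega : y0 + a < y0 + b), List.map_cons, List.map_cons,
        ih (a + 1) b (by omega)]
      have : y0 + (a + 1) = y0 + a + 1 := by ring
      rw [this]

-- flatMap over a list equals flatMap over its filtered list when dropped elements map to []
theorem pv_flatMap_filter {α β : Type} (p : α → Bool) (G : α → List β) :
    ∀ (l : List α), (∀ x ∈ l, p x = false → G x = []) →
      l.flatMap G = (l.filter p).flatMap G := by
  intro l
  induction l with
  | nil => intro _; rfl
  | cons x t ih =>
    intro h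
    rw [List.flatMap_cons, List.filter_cons]
    by_cases hp : p x = true
    · rw [if_pos hp, List.flatMap_cons, ih (fun y hy => h y (List.mem_cons_of_mem x hy))]
    · rw [if_neg hp, h x (List.mem_cons_self) (by simpa using hp),
        ih (fun y hy => h y (List.mem_cons_of_mem x hy)), List.nil_append]

-- flatMap congruence on members
theorem pv_flatMap_congr {α β : Type} (G H : α → List β) :
    ∀ (l : List α), (∀ x ∈ l, G x = H x) → l.flatMap G = l.flatMap H := by
  intro l
  induction l with
  | nil => intro _; rfl
  | cons x t ih =>
    intro h
    rw [List.flatMap_cons, List.flatMap_cons, h x List.mem_cons_self,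
      ih (fun y hy => h y (List.mem_cons_of_mem x hy))]

theorem tiles_spec_core (pos : Int × Int) (a_range : Int × Int) (w : Int) (h_ : Int) :
    tiles_in_attack_range_py pos a_range w h_ = tiles_in_attack_range_py_alt pos a_range w h_ := by
  unfold tiles_in_attack_range_py tiles_in_attack_range_py_alt
  obtain ⟨min_r, max_r⟩ := a_range
  obtain ⟨x0, y0⟩ := pos
  dsimp only
  -- A's inner loop as a filter+map (merge the two nested ifs, then foldl_append_ite)
  have hinner : (fun (acc : List (Int × Int)) (dx : Int) =>
      (PySem.List.pyRange (-max_r) (max_r + 1) 1).foldl (fun acc dy =>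
        if min_r ≤ |dx| + |dy| ∧ |dx| + |dy| ≤ max_r then
          if 0 ≤ x0 + dx ∧ x0 + dx < w ∧ 0 ≤ y0 + dy ∧ y0 + dy < h_ then
            acc ++ [(x0 + dx, y0 + dy)] else acc
        else acc) acc) =
      (fun (acc : List (Int × Int)) (dx : Int) =>
        acc ++ ((PySem.List.pyRange (-max_r) (max_r + 1) 1).filter (fun dy =>
          decide ((min_r ≤ |dx| + |dy| ∧ |dx| + |dy| ≤ max_r) ∧
            (0 ≤ x0 + dx ∧ x0 + dx < w ∧ 0 ≤ y0 + dy ∧ y0 + dy < h_)))).map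
          (fun dy => (x0 + dx, y0 + dy))) := by
    funext acc dx
    rw [← PySem.List.foldl_append_ite]
    apply PySem.List.foldl_congr_mem
    intro acc' dy _
    by_cases h1 : min_r ≤ |dx| + |dy| ∧ |dx| + |dy| ≤ max_r <;>
      by_cases h2 : 0 ≤ x0 + dx ∧ x0 + dx < w ∧ 0 ≤ y0 + dy ∧ y0 + dy < h_ <;>
      simp [h1, h2]
  rw [hinner, PySem.List.foldl_append_eq_flatMap, List.nil_append]
  -- reindex the outer loop from dx to nx = x0 + dx
  have hshift : PySem.List.pyRange (x0 - max_r) (x0 + max_r + 1) 1 =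
      (PySem.List.pyRange (-max_r) (max_r + 1) 1).map (fun dx => x0 + dx) := by
    rw [PySem.List.pyRange_one, PySem.List.pyRange_one, List.map_map]
    have h1 : (x0 + max_r + 1 - (x0 - max_r)).toNat = (max_r + 1 - -max_r).toNat := by omega
    rw [h1]
    apply List.map_congr_left
    intro k _
    simp only [Function.comp_apply]
    omega
  have hreindex : (PySem.List.pyRange (-max_r) (max_r + 1) 1).flatMap (fun dx =>
      ((PySem.List.pyRange (-max_r) (max_r + 1) 1).filter (fun dy =>
        decide ((min_r ≤ |dx| + |dy| ∧ |dx| + |dy| ≤ max_r) ∧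
          (0 ≤ x0 + dx ∧ x0 + dx < w ∧ 0 ≤ y0 + dy ∧ y0 + dy < h_)))).map
        (fun dy => (x0 + dx, y0 + dy))) =
      (PySem.List.pyRange (x0 - max_r) (x0 + max_r + 1) 1).flatMap (fun nx =>
        ((PySem.List.pyRange (-max_r) (max_r + 1) 1).filter (fun dy =>
          decide ((min_r ≤ |nx - x0| + |dy| ∧ |nx - x0| + |dy| ≤ max_r) ∧
            (0 ≤ nx ∧ nx < w ∧ 0 ≤ y0 + dy ∧ y0 + dy < h_)))).map
          (fun dy => (nx, y0 + dy))) := by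
    rw [hshift, List.flatMap_map]
    apply pv_flatMap_congr
    intro dx _
    have : x0 + dx - x0 = dx := by ring
    rw [this]
  rw [hreindex]
  -- drop the out-of-grid columns: they contribute []
  rw [pv_flatMap_filter (fun nx => decide (0 ≤ nx ∧ nx ≤ w - 1)) _ _ ?hnil]
  case hnil =>
    intro nx _ hp
    rw [List.filter_eq_nil_iff.mpr ?_, List.map_nil]
    intro dy _
    rw [decide_eq_false_iff_not] at hp
    simp only [decide_eq_true_eq]
    intro hcon
    exact hp ⟨hcon.2.1, by omega⟩
  rw [pv_filter_range_interval 0 (w - 1) (x0 + max_r + 1 - (x0 - max_r)).toNat _ _ (by omega)]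
  have hbnd : PySem.List.pyRange (max (x0 - max_r) 0) (min (x0 + max_r + 1) (w - 1 + 1)) 1 =
      PySem.List.pyRange (max 0 (x0 - max_r)) (min w (x0 + max_r + 1)) 1 := by
    congr 1 <;> omega
  rw [hbnd]
  -- per in-grid column: the filtered dy list is the band, clamped to the rows
  apply pv_flatMap_congr
  intro nx hnx
  have hnx' := (PySem.List.mem_pyRange_one).mp hnx
  have hxb : 0 ≤ nx ∧ nx < w := by constructor <;> omega
  have hm0 : 0 ≤ |nx - x0| := abs_nonneg _
  have hmR : |nx - x0| ≤ max_r := abs_le.mpr ⟨by omega, by omega⟩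
  -- split the filter: distance condition, then row bounds
  have hsplit : (PySem.List.pyRange (-max_r) (max_r + 1) 1).filter (fun dy =>
      decide ((min_r ≤ |nx - x0| + |dy| ∧ |nx - x0| + |dy| ≤ max_r) ∧
        (0 ≤ nx ∧ nx < w ∧ 0 ≤ y0 + dy ∧ y0 + dy < h_))) =
      ((PySem.List.pyRange (-max_r) (max_r + 1) 1).filter (fun dy =>
        decide (min_r ≤ |nx - x0| + |dy| ∧ |nx - x0| + |dy| ≤ max_r))).filter
        (fun dy => decide (-y0 ≤ dy ∧ dy ≤ h_ - 1 - y0)) := by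
    rw [List.filter_filter]
    apply List.filter_congr
    intro dy _
    simp only [← Bool.decide_and, decide_eq_decide]
    constructor
    · rintro ⟨h1, h2⟩; exact ⟨⟨by omega, by omega⟩, h1⟩
    · rintro ⟨h1, h2⟩; exact ⟨h2, hxb.1, hxb.2, by omega, by omega⟩
  rw [hsplit]
  by_cases hz : 0 < min_r - |nx - x0|
  · -- two segments: B takes the else branch (lo = min_r - m > 0)
    rw [pv_band_pos min_r max_r |nx - x0| hm0 hmR hz,
      if_neg (show ¬ (max 0 (min_r - |nx - x0|) = 0) by omega),
      List.filter_append, List.map_append,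
      pv_filter_range_interval (-y0) (h_ - 1 - y0)
        ((-(min_r - |nx - x0|) + 1 - -(max_r - |nx - x0|)).toNat) _ _ (by omega),
      pv_filter_range_interval (-y0) (h_ - 1 - y0)
        ((max_r - |nx - x0| + 1 - (min_r - |nx - x0|)).toNat) _ _ (by omega),
      pv_map_pair_shift nx y0
        ((min (-(min_r - |nx - x0|) + 1) (h_ - 1 - y0 + 1) -
          max (-(max_r - |nx - x0|)) (-y0)).toNat) _ _ (by omega),
      pv_map_pair_shift nx y0
        ((min (max_r - |nx - x0| + 1) (h_ - 1 - y0 + 1) -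
          max (min_r - |nx - x0|) (-y0)).toNat) _ _ (by omega)]
    congr 2 <;> [skip; skip] <;> congr 1 <;> omega
  · -- single contiguous segment: B takes the then branch (lo = 0)
    rw [pv_band_zero min_r max_r |nx - x0| hm0 hmR (by omega),
      if_pos (show max 0 (min_r - |nx - x0|) = 0 by omega),
      pv_filter_range_interval (-y0) (h_ - 1 - y0)
        ((max_r - |nx - x0| + 1 - -(max_r - |nx - x0|)).toNat) _ _ (by omega),
      pv_map_pair_shift nx y0
        ((min (max_r - |nx - x0| + 1) (h_ - 1 - y0 + 1) -
          max (-(max_r - |nx - x0|)) (-y0)).toNat) _ _ (by omega)]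
    congr 1
    congr 1 <;> omega

-- ===== VERDICT (by name: the statement is the Claim_ definition above) =====
theorem tiles_in_attack_range_py_spec : Claim_equal_tiles_in_attack_range_py := by
  intro pos a_range w h_ _
  unfold Spec_tiles_in_attack_range_py
  exact tiles_spec_core pos a_range w h_
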